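-- pv_equiv track=rewrite | github.com/qwas15788hj/-Algorithm | Programmers/169199. 리코쳇 로봇.py | solution
-- ===== SOURCE A (Python) =====
-- from collections import deque
--
-- def solution(board):
--     answer = 0
--     n = len(board)  # 세로 5
--     m = len(board[0])  # 가로 7
--     visited = [[False] * m for _ in range(n)]  # 방문 처리
--
--     # 시작 지점 구하기
--     start_x, start_y = 0, 0
--     for i in range(n):
--         for j in range(m):
--             if board[i][j] == "R":
--                 start_x, start_y = i, j  # 세로, 가로
--
--     # 4 방향
--     dx = [-1, 1, 0, 0]
--     dy = [0, 0, -1, 1]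
--     # 큐 이용
--     queue = deque([])
--     queue.append([start_x, start_y])
--     visited[start_x][start_y] = True
--     flag = False
--     # 큐 돌면서
--     while queue:
--         size = len(queue)  # 큐 크기로 돌아야 모든 위치 4방향 조회 가능
--         for j in range(size):  # 큐 크기로 돌면서
--             x, y = queue.popleft()  # 뽑고
--             if board[x][y] == "G":  # 도착 지점이면
--                 flag = True  # 체크
--                 break
--             for i in range(4):  # 4방향 돌면서
--                 nx, ny = x, y
--                 while True:  # 현재 방향으로 한 칸씩 계속 이동
--                     nx += dx[i]
--                     ny += dy[i]
--                     if nx < 0 or nx >= n or ny < 0 or ny >= m:  # 다음 위치가 범위 밖이고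
--                         if not visited[nx - dx[i]][ny - dy[i]]:  # 이전 위치 방문 안했으면
--                             visited[nx - dx[i]][ny - dy[i]] = True  # 이전 위치 방문 체크
--                             queue.append([nx - dx[i], ny - dy[i]])  # 이전 위치 큐에 넣기
--                             break  # 방문 안했을 때 break
--                         break  # 범위 밖일 때 break
--
--                     if board[nx][ny] == "D":  # 다음 위치가 벽이면
--                         if not visited[nx - dx[i]][ny - dy[i]]:  # 벽이고, 이전 위치를 방문 안했으면
--                             visited[nx - dx[i]][ny - dy[i]] = True  # 이전 위치 방문 체크
--                             queue.append([nx - dx[i], ny - dy[i]])  # 이전 위치 큐에 넣기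
--                             break  # 방문 안했을 때 break
--                         break  # 벽 일때 break
--                     # 중요!! 위치와 방문 체크를 and로 함께 하면, 방문 안한 벽이거나, 범위 밖이여서 잘못된 값이 들어감!
--                     # 따라서 따로따로 체크 해야함!
--                     # 예시로 다음이 벽이면 무조건 멈춰야하지만, 이전 위치가 방문 안했으면, while문을 타서 계속 돔! => 오류
--         if flag:  # 위치 찾았다면
--             break  # 끝
--         answer += 1  # 시간 + 1
--
--     if not flag:  # 위치 못찾았으면
--         answer = -1  # -1
--
--     return answer
-- ===== SOURCE B (Python) =====
-- def solution(board):
--     n, m = len(board), len(board[0])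
--     # slide-destination tables, one per direction, built by O(n*m) DP sweeps
--     up, left = [], []
--     for i in range(n):
--         upr, lfr = [], []
--         for j in range(m):
--             upr.append(i if i == 0 or board[i - 1][j] == "D" else up[i - 1][j])
--             lfr.append(j if j == 0 or board[i][j - 1] == "D" else lfr[j - 1])
--         up.append(upr)
--         left.append(lfr)
--     down, right = [], []
--     for i in range(n - 1, -1, -1):
--         dnr, rtr = [], []
--         for j in range(m - 1, -1, -1):
--             dnr.append(i if i == n - 1 or board[i + 1][j] == "D" else down[-1][j])
--             rtr.append(j if j == m - 1 or board[i][j + 1] == "D" else rtr[-1])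
--         dnr.reverse()
--         rtr.reverse()
--         down.append(dnr)
--         right.append(rtr)
--     down.reverse()
--     right.reverse()
--
--     start = (0, 0)
--     for i in range(n):
--         for j in range(m):
--             if board[i][j] == "R":
--                 start = (i, j)
--
--     visited = [[False] * m for _ in range(n)]
--     visited[start[0]][start[1]] = True
--     frontier = [start]
--     dist = 0
--     while frontier:
--         nxt = []
--         for x, y in frontier:
--             if board[x][y] == "G":
--                 return dist
--             for e in ((up[x][y], y), (down[x][y], y), (x, left[x][y]), (x, right[x][y])):
--                 if not visited[e[0]][e[1]]:
--                     visited[e[0]][e[1]] = True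
--                     nxt.append(e)
--         frontier = nxt
--         dist += 1
--     return -1
-- ===== Notes on version B (the rewrite author's own statement) =====
-- stated objective: alternative
-- what changed: B replaces A's per-move cell-by-cell slide scan inside the BFS by four slide-destination tables precomputed with O(n*m) DP sweeps, so each BFS transition is an O(1) table lookup (worst-case O(n*m) vs A's O(n*m*(n+m))).
import Mathlib
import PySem

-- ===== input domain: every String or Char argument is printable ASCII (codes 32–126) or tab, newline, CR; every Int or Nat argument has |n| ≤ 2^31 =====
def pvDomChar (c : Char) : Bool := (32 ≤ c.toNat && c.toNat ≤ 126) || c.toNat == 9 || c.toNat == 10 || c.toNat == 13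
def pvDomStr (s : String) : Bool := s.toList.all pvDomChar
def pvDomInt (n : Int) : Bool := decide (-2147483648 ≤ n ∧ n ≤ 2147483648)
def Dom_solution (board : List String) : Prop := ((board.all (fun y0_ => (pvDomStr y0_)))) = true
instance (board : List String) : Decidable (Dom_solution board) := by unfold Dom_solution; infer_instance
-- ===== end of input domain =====

-- B replaces A's per-move cell-by-cell slide scan by four slide-destination tables built with DP sweeps,
-- so each BFS transition is a table lookup (alternative algorithm; equivalence of return values proved).

-- ===== shared helpers (these lines of Python are identical in A and in B) =====

-- board[i][j] as a Char; the default ' ' is only reached outside Pre_solution (Python raises there)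
def bget (board : List String) (i j : Int) : Char :=
  (PySem.List.pyGet? ((PySem.List.pyGet? board i).getD "").toList j).getD ' '

-- visited[i][j] (in-range under Pre_; default irrelevant and identical on both sides)
def vget (v : List (List Bool)) (i j : Int) : Bool :=
  PySem.List.pyGetD (PySem.List.pyGetD v i []) j false

-- visited[i][j] = True
def vset (v : List (List Bool)) (i j : Int) : List (List Bool) :=
  PySem.List.pySetD v i (PySem.List.pySetD (PySem.List.pyGetD v i []) j true)

-- [[False]*m for _ in range(n)]
def mkGrid (n m : Int) : List (List Bool) :=
  List.replicate n.toNat (List.replicate m.toNat false)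

-- the start-scan loop (last 'R' wins), identical in both sources
def findStart (board : List String) (n m : Int) : Int × Int :=
  (PySem.List.pyRange 0 n 1).foldl (fun s i =>
    (PySem.List.pyRange 0 m 1).foldl (fun s j =>
      if bget board i j == 'R' then (i, j) else s) s) (0, 0)

-- ===== PORT A =====

def dirsA : List (Int × Int) := [(-1, 0), (1, 0), (0, -1), (0, 1)]

-- A's inner 'while True' slide; fuel (n+m).toNat is enough for at most max(n,m) one-cell steps
def slideA (board : List String) (n m dx dy : Int) : Nat → Int → Int → Int × Int
  | 0, x, y => (x, y)
  | f + 1, x, y =>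
    let nx := x + dx
    let ny := y + dy
    if nx < 0 || n ≤ nx || ny < 0 || m ≤ ny then (x, y)
    else if bget board nx ny == 'D' then (x, y)
    else slideA board n m dx dy f nx ny

-- A's 'for i in range(4)' over one popped cell: slide, then mark/append if unvisited
def expandA (board : List String) (n m : Int) (sf : Nat) (x y : Int)
    (qv : List (Int × Int) × List (List Bool)) : List (Int × Int) × List (List Bool) :=
  dirsA.foldl (fun qv d =>
    let e := slideA board n m d.1 d.2 sf x y
    if vget qv.2 e.1 e.2 then qv else (qv.1 ++ [e], vset qv.2 e.1 e.2)) qv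

-- A's 'for j in range(size)' level loop (k = size pops; the [] branch is unreachable, Python's popleft)
def levelA (board : List String) (n m : Int) (sf : Nat) :
    Nat → List (Int × Int) → List (List Bool) → List (Int × Int) × List (List Bool) × Bool
  | 0, q, v => (q, v, false)
  | _ + 1, [], v => ([], v, false)
  | k + 1, (x, y) :: rest, v =>
    if bget board x y == 'G' then (rest, v, true)
    else
      let qv := expandA board n m sf x y (rest, v)
      levelA board n m sf k qv.1 qv.2

-- A's 'while queue' loop; fuel n*m+2 bounds the number of levels (each non-final level marks a new cell)
def bfsA (board : List String) (n m : Int) (sf : Nat) :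
    Nat → List (Int × Int) → List (List Bool) → Int → Int
  | 0, _, _, _ => -1
  | f + 1, q, v, ans =>
    if q.isEmpty then -1
    else
      let r := levelA board n m sf q.length q v
      if r.2.2 then ans else bfsA board n m sf f r.1 r.2.1 (ans + 1)

def solution (board : List String) : Int :=
  let n : Int := (board.length : Int)
  let m : Int := (((PySem.List.pyGet? board 0).getD "").toList.length : Int)
  let s := findStart board n m
  let v := vset (mkGrid n m) s.1 s.2
  bfsA board n m (n + m).toNat (n.toNat * m.toNat + 2) [s] v 0

-- ===== PORT B =====

-- table[i][j]; all lookups are in range under Pre_, defaults are never returned there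
def tget (t : List (List Int)) (i j : Int) : Int :=
  PySem.List.pyGetD (PySem.List.pyGetD t i []) j 0

-- one row of B's top-left sweep: upr/lfr built by appending (lfr[j-1] = last element so far)
def topRowB (board : List String) (m i : Int) (up : List (List Int)) : List Int × List Int :=
  (PySem.List.pyRange 0 m 1).foldl (fun r j =>
    (r.1 ++ [if i == 0 || bget board (i - 1) j == 'D' then i else tget up (i - 1) j],
     r.2 ++ [if j == 0 || bget board i (j - 1) == 'D' then j else PySem.List.pyGetD r.2 (j - 1) 0]))
    ([], [])

-- B's 'for i in range(n)' building up and left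
def topTablesB (board : List String) (n m : Int) : List (List Int) × List (List Int) :=
  (PySem.List.pyRange 0 n 1).foldl (fun t i =>
    let r := topRowB board m i t.1
    (t.1 ++ [r.1], t.2 ++ [r.2])) ([], [])

-- one row of B's bottom-right sweep, built in reverse (down[-1] / rtr[-1] = last appended)
def botRowB (board : List String) (n m i : Int) (down : List (List Int)) : List Int × List Int :=
  (PySem.List.pyRange (m - 1) (-1) (-1)).foldl (fun r j =>
    (r.1 ++ [if i == n - 1 || bget board (i + 1) j == 'D' then i else tget down (-1) j],
     r.2 ++ [if j == m - 1 || bget board i (j + 1) == 'D' then j else PySem.List.pyGetD r.2 (-1) 0]))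
    ([], [])

-- B's 'for i in range(n-1, -1, -1)' building down and right, rows and table reversed at the end
def botTablesB (board : List String) (n m : Int) : List (List Int) × List (List Int) :=
  let p := (PySem.List.pyRange (n - 1) (-1) (-1)).foldl (fun t i =>
    let r := botRowB board n m i t.1
    (t.1 ++ [r.1.reverse], t.2 ++ [r.2.reverse])) ([], [])
  (p.1.reverse, p.2.reverse)

-- B's 'for e in (...)' over the four table destinations of one frontier cell
def expandB (up down left right : List (List Int)) (x y : Int)
    (nv : List (Int × Int) × List (List Bool)) : List (Int × Int) × List (List Bool) :=
  [(tget up x y, y), (tget down x y, y), (x, tget left x y), (x, tget right x y)].foldl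
    (fun nv e => if vget nv.2 e.1 e.2 then nv else (nv.1 ++ [e], vset nv.2 e.1 e.2)) nv

-- B's 'for x, y in frontier' with the running nxt accumulator
def levelB (board : List String) (up down left right : List (List Int)) :
    List (Int × Int) → List (Int × Int) → List (List Bool) →
    List (Int × Int) × List (List Bool) × Bool
  | [], nxt, v => (nxt, v, false)
  | (x, y) :: rest, nxt, v =>
    if bget board x y == 'G' then (nxt, v, true)
    else
      let r := expandB up down left right x y (nxt, v)
      levelB board up down left right rest r.1 r.2

-- B's 'while frontier' loop (same fuel bound as A's while loop)
def bfsB (board : List String) (up down left right : List (List Int)) :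
    Nat → List (Int × Int) → List (List Bool) → Int → Int
  | 0, _, _, _ => -1
  | f + 1, frontier, v, dist =>
    if frontier.isEmpty then -1
    else
      let r := levelB board up down left right frontier [] v
      if r.2.2 then dist else bfsB board up down left right f r.1 r.2.1 (dist + 1)

def solution_alt (board : List String) : Int :=
  let n : Int := (board.length : Int)
  let m : Int := (((PySem.List.pyGet? board 0).getD "").toList.length : Int)
  let t := topTablesB board n m
  let b := botTablesB board n m
  let s := findStart board n m
  let v := vset (mkGrid n m) s.1 s.2
  bfsB board t.1 b.1 t.2 b.2 (n.toNat * m.toNat + 2) [s] v 0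

-- ===== PRECONDITION & SPEC =====

-- Pre_ is exactly where the Python A returns: A raises IndexError iff board is empty, its first row is
-- empty, or some row is shorter than the first (the start scan reads every cell board[i][j], j < len(board[0])).
def Pre_solution (board : List String) : Prop :=
  board ≠ [] ∧ 0 < (board.headD "").toList.length ∧
    ∀ s ∈ board, (board.headD "").toList.length ≤ s.toList.length
instance (board : List String) : Decidable (Pre_solution board) := by
  unfold Pre_solution; infer_instance

def pvWitness_solution : List String := ["RG"]

def Spec_solution (board : List String) (out : Int) : Prop := out = solution_alt board
instance (board : List String) (out : Int) : Decidable (Spec_solution board out) := by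
  unfold Spec_solution; infer_instance

-- ===== CLAIM (what is proved, stated in full; the proofs are below) =====
def Claim_equal_solution : Prop :=
  ∀ (board : List String), Dom_solution board → Pre_solution board →
    Spec_solution board (solution board)

-- ===== LEMMAS AND PROOFS =====


-- spec slide destinations (proof-side only)
def sUp (board : List String) : Nat → Int → Int
  | 0, _ => 0
  | i + 1, j => if bget board i j == 'D' then ((i : Int) + 1) else sUp board i j

def sLeft (board : List String) (i : Int) : Nat → Int
  | 0 => 0
  | j + 1 => if bget board i j == 'D' then ((j : Int) + 1) else sLeft board i j

def sDown (board : List String) : Nat → Int → Int → Int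
  | 0, i, _ => i
  | g + 1, i, j => if bget board (i + 1) j == 'D' then i else sDown board g (i + 1) j

def sRight (board : List String) : Nat → Int → Int → Int
  | 0, _, j => j
  | g + 1, i, j => if bget board i (j + 1) == 'D' then j else sRight board g i (j + 1)

lemma sUp_bounds (board : List String) (a : Nat) (y : Int) :
    0 ≤ sUp board a y ∧ sUp board a y ≤ (a : Int) := by
  induction a with
  | zero => simp [sUp]
  | succ a ih => unfold sUp; split <;> push_cast <;> omega

lemma sLeft_bounds (board : List String) (i : Int) (b : Nat) :
    0 ≤ sLeft board i b ∧ sLeft board i b ≤ (b : Int) := by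
  induction b with
  | zero => simp [sLeft]
  | succ b ih => unfold sLeft; split <;> push_cast <;> omega

lemma sDown_bounds (board : List String) (g : Nat) (x y : Int) :
    x ≤ sDown board g x y ∧ sDown board g x y ≤ x + g := by
  induction g generalizing x with
  | zero => simp [sDown]
  | succ g ih =>
    unfold sDown; split
    · omega
    · have := ih (x + 1); push_cast at *; omega

lemma sRight_bounds (board : List String) (g : Nat) (x y : Int) :
    y ≤ sRight board g x y ∧ sRight board g x y ≤ y + g := by
  induction g generalizing y with
  | zero => simp [sRight]
  | succ g ih =>
    unfold sRight; split
    · omega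
    · have := ih (y + 1); push_cast at *; omega

lemma slideA_up (board : List String) (n m y : Int) (hy0 : 0 ≤ y) (hym : y < m) :
    ∀ (a f : Nat), (a : Int) < n → a < f →
      slideA board n m (-1) 0 f (a : Int) y = (sUp board a y, y) := by
  intro a
  induction a with
  | zero =>
    intro f _ hf
    match f, hf with
    | f + 1, _ =>
      simp only [slideA, sUp]
      norm_num
  | succ a ih =>
    intro f hn hf
    match f, hf with
    | f + 1, hf =>
      simp only [slideA]
      rw [show ((a + 1 : Nat) : Int) + -1 = (a : Int) from by push_cast; ring,
          show y + 0 = y from by ring]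
      have h1 : ¬((a : Int) < 0 || n ≤ (a : Int) || y < 0 || m ≤ y) = true := by
        push_cast at hn ⊢; simp; omega
      rw [if_neg h1]
      by_cases hD : (bget board (a : Int) y == 'D') = true
      · rw [if_pos hD]
        unfold sUp
        rw [if_pos hD]
        push_cast; ring_nf
      · rw [if_neg hD]
        rw [ih f (by push_cast at hn ⊢; omega) (by omega)]
        conv_rhs => rw [sUp]
        rw [if_neg hD]

lemma slideA_left (board : List String) (n m x : Int) (hx0 : 0 ≤ x) (hxn : x < n) :
    ∀ (b f : Nat), (b : Int) < m → b < f →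
      slideA board n m 0 (-1) f x (b : Int) = (x, sLeft board x b) := by
  intro b
  induction b with
  | zero =>
    intro f _ hf
    match f, hf with
    | f + 1, _ =>
      simp only [slideA, sLeft]
      norm_num
  | succ b ih =>
    intro f hm hf
    match f, hf with
    | f + 1, hf =>
      simp only [slideA]
      rw [show ((b + 1 : Nat) : Int) + -1 = (b : Int) from by push_cast; ring,
          show x + 0 = x from by ring]
      have h1 : ¬(x < 0 || n ≤ x || (b : Int) < 0 || m ≤ (b : Int)) = true := by
        push_cast at hm ⊢; simp; omega
      rw [if_neg h1]
      by_cases hD : (bget board x (b : Int) == 'D') = true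
      · rw [if_pos hD]
        unfold sLeft
        rw [if_pos hD]
        push_cast; ring_nf
      · rw [if_neg hD]
        rw [ih f (by push_cast at hm ⊢; omega) (by omega)]
        conv_rhs => rw [sLeft]
        rw [if_neg hD]

lemma slideA_down (board : List String) (n m y : Int) (hy0 : 0 ≤ y) (hym : y < m) :
    ∀ (g f : Nat) (x : Int), 0 ≤ x → x + g = n - 1 → g < f →
      slideA board n m 1 0 f x y = (sDown board g x y, y) := by
  intro g
  induction g with
  | zero =>
    intro f x hx0 hxe hf
    match f, hf with
    | f + 1, _ =>
      simp only [slideA, sDown]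
      have h1 : (x + 1 < 0 || n ≤ x + 1 || y + 0 < 0 || m ≤ y + 0) = true := by
        simp; omega
      rw [if_pos h1]
  | succ g ih =>
    intro f x hx0 hxe hf
    match f, hf with
    | f + 1, hf =>
      simp only [slideA]
      rw [show y + 0 = y from by ring]
      have h1 : ¬(x + 1 < 0 || n ≤ x + 1 || y < 0 || m ≤ y) = true := by
        push_cast at hxe ⊢; simp; omega
      rw [if_neg h1]
      by_cases hD : (bget board (x + 1) y == 'D') = true
      · rw [if_pos hD]
        unfold sDown
        rw [if_pos hD]
      · rw [if_neg hD]
        rw [ih f (x + 1) (by omega) (by push_cast at hxe ⊢; omega) (by omega)]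
        conv_rhs => rw [sDown]
        rw [if_neg hD]

lemma slideA_right (board : List String) (n m x : Int) (hx0 : 0 ≤ x) (hxn : x < n) :
    ∀ (g f : Nat) (y : Int), 0 ≤ y → y + g = m - 1 → g < f →
      slideA board n m 0 1 f x y = (x, sRight board g x y) := by
  intro g
  induction g with
  | zero =>
    intro f y hy0 hye hf
    match f, hf with
    | f + 1, _ =>
      simp only [slideA, sRight]
      have h1 : (x + 0 < 0 || n ≤ x + 0 || y + 1 < 0 || m ≤ y + 1) = true := by
        simp; omega
      rw [if_pos h1]
  | succ g ih =>
    intro f y hy0 hye hf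
    match f, hf with
    | f + 1, hf =>
      simp only [slideA]
      rw [show x + 0 = x from by ring]
      have h1 : ¬(x < 0 || n ≤ x || y + 1 < 0 || m ≤ y + 1) = true := by
        push_cast at hye ⊢; simp; omega
      rw [if_neg h1]
      by_cases hD : (bget board x (y + 1) == 'D') = true
      · rw [if_pos hD]
        unfold sRight
        rw [if_pos hD]
      · rw [if_neg hD]
        rw [ih f (y + 1) (by omega) (by push_cast at hye ⊢; omega) (by omega)]
        conv_rhs => rw [sRight]
        rw [if_neg hD]

-- expected final tables
def upT (board : List String) (n m : Int) : List (List Int) :=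
  (List.range n.toNat).map (fun a => (List.range m.toNat).map (fun b => sUp board a ((b : Nat) : Int)))

def leftT (board : List String) (n m : Int) : List (List Int) :=
  (List.range n.toNat).map (fun a => (List.range m.toNat).map (fun b => sLeft board ((a : Nat) : Int) b))

def downT (board : List String) (n m : Int) : List (List Int) :=
  (List.range n.toNat).map (fun a =>
    (List.range m.toNat).map (fun b => sDown board (n - 1 - ((a : Nat) : Int)).toNat ((a : Nat) : Int) ((b : Nat) : Int)))

def rightT (board : List String) (n m : Int) : List (List Int) :=
  (List.range n.toNat).map (fun a =>
    (List.range m.toNat).map (fun b => sRight board (m - 1 - ((b : Nat) : Int)).toNat ((a : Nat) : Int) ((b : Nat) : Int)))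

lemma topRowB_eq (board : List String) (m : Int) (i : Int) (up : List (List Int)) :
    topRowB board m i up =
      ((List.range m.toNat).map (fun (b : Nat) =>
          if i == 0 || bget board (i - 1) (b : Int) == 'D' then i else tget up (i - 1) ((b : Nat) : Int)),
       (List.range m.toNat).map (fun (b : Nat) => sLeft board i b)) := by
  unfold topRowB
  rw [PySem.List.pyRange_one]
  simp only [zero_add, Int.sub_zero, List.foldl_map]
  induction m.toNat with
  | zero => simp
  | succ M ih =>
    rw [List.range_succ, List.foldl_append, ih]
    simp only [List.foldl_cons, List.foldl_nil, List.map_append, List.map_cons, List.map_nil]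
    refine Prod.ext rfl ?_
    simp only []
    congr 1
    congr 1
    cases M with
    | zero => simp [sLeft]
    | succ M' =>
      have hne : (((M' + 1 : Nat) : Int) == 0) = false := by simp; omega
      rw [hne, Bool.false_or,
          show ((M' + 1 : Nat) : Int) - 1 = ((M' : Nat) : Int) from by push_cast; ring]
      rw [PySem.List.pyGetD_natCast]
      have : (List.map (fun (b : Nat) => sLeft board i b) (List.range (M' + 1))).getD M' 0
          = sLeft board i M' := by simp
      rw [this]
      conv_rhs => rw [sLeft]
      push_cast
      rfl

lemma topTablesB_eq (board : List String) (n m : Int) :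
    topTablesB board n m = (upT board n m, leftT board n m) := by
  unfold topTablesB upT leftT
  rw [PySem.List.pyRange_one]
  simp only [zero_add, Int.sub_zero, List.foldl_map]
  induction n.toNat with
  | zero => simp
  | succ N ih =>
    rw [List.range_succ, List.foldl_append, ih]
    simp only [List.foldl_cons, List.foldl_nil, List.map_append, List.map_cons, List.map_nil]
    rw [topRowB_eq]
    refine Prod.ext ?_ rfl
    simp only [List.range_succ]
    congr 1
    congr 1
    apply List.map_congr_left
    intro b hb
    have hbm : b < m.toNat := List.mem_range.mp hb
    cases N with
    | zero => simp [sUp]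
    | succ N' =>
      have hne : (((N' + 1 : Nat) : Int) == 0) = false := by simp; omega
      rw [hne, Bool.false_or,
          show ((N' + 1 : Nat) : Int) - 1 = ((N' : Nat) : Int) from by push_cast; ring]
      unfold tget
      simp only [PySem.List.pyGetD_natCast]
      simp only [List.getD_eq_getElem?_getD, List.getElem?_map, List.getElem?_range, hbm]
      simp [hbm]
      conv_rhs => rw [sUp]
      push_cast
      simp

lemma reverse_map_range {α : Type} (M : Nat) (mI : Int) (hM : (M : Int) = mI) (g : Int → α) :
    ((List.range M).map (fun (k : Nat) => g (mI - 1 - (k : Int)))).reverse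
      = (List.range M).map (fun (k : Nat) => g ((k : Nat) : Int)) := by
  apply List.ext_getElem
  · simp
  · intro i h1 h2
    simp only [List.getElem_reverse, List.getElem_map, List.getElem_range,
      List.length_map, List.length_range]
    congr 1
    simp only [List.length_reverse, List.length_map, List.length_range] at h1 h2
    subst hM
    omega

lemma botRowB_eq (board : List String) (n m i : Int) (down : List (List Int))
    (hdown : i ≠ n - 1 → ∀ b : Nat, b < m.toNat →
      tget down (-1) (b : Int) = sDown board (n - 1 - (i + 1)).toNat (i + 1) (b : Int))
    (hi : i ≤ n - 1) :
    botRowB board n m i down =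
      ((List.range m.toNat).map (fun (k : Nat) =>
          sDown board (n - 1 - i).toNat i (m - 1 - (k : Int))),
       (List.range m.toNat).map (fun (k : Nat) =>
          sRight board (m - 1 - (m - 1 - (k : Int))).toNat i (m - 1 - (k : Int)))) := by
  unfold botRowB
  rw [PySem.List.pyRange_neg_one]
  rw [show (m - 1 - (-1)).toNat = m.toNat from by omega]
  simp only [List.foldl_map]
  suffices h : ∀ M : Nat, M ≤ m.toNat →
      List.foldl
        (fun (r : List Int × List Int) (k : Nat) =>
          (r.1 ++ [if i == n - 1 || bget board (i + 1) (m - 1 - (k : Int)) == 'D' then i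
                   else tget down (-1) (m - 1 - (k : Int))],
           r.2 ++ [if (m - 1 - (k : Int)) == m - 1 || bget board i ((m - 1 - (k : Int)) + 1) == 'D'
                   then (m - 1 - (k : Int)) else PySem.List.pyGetD r.2 (-1) 0]))
        ([], []) (List.range M) =
      ((List.range M).map (fun (k : Nat) => sDown board (n - 1 - i).toNat i (m - 1 - (k : Int))),
       (List.range M).map (fun (k : Nat) =>
          sRight board (m - 1 - (m - 1 - (k : Int))).toNat i (m - 1 - (k : Int)))) by
    exact h m.toNat le_rfl
  intro M hM
  induction M with
  | zero => simp
  | succ M' ih =>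
    rw [List.range_succ, List.foldl_append, ih (by omega)]
    simp only [List.foldl_cons, List.foldl_nil, List.range_succ, List.map_append,
      List.map_cons, List.map_nil]
    have hm0 : 0 < m := by omega
    refine Prod.ext ?_ ?_
    · simp only []
      congr 1
      congr 1
      by_cases hc : i = n - 1
      · have : (i == n - 1) = true := by simp [hc]
        rw [this, Bool.true_or, if_pos rfl,
            show (n - 1 - i).toNat = 0 from by omega]
        rfl
      · have hlt : i < n - 1 := by omega
        have : (i == n - 1) = false := by simp [hc]
        rw [this, Bool.false_or]
        have hb : (m.toNat - 1 - M' : Nat) < m.toNat := by omega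
        have hbe : ((m.toNat - 1 - M' : Nat) : Int) = m - 1 - (M' : Int) := by omega
        rw [show (m - 1 - (M' : Int)) = ((m.toNat - 1 - M' : Nat) : Int) from hbe.symm]
        rw [hdown hc _ hb]
        rw [show (n - 1 - i).toNat = (n - 1 - (i + 1)).toNat + 1 from by omega]
        rw [sDown]
    · simp only []
      congr 1
      congr 1
      cases M' with
      | zero =>
        have : ((m - 1 - ((0 : Nat) : Int)) == m - 1) = true := by simp
        rw [this, Bool.true_or, if_pos rfl,
            show (m - 1 - (m - 1 - ((0 : Nat) : Int))).toNat = 0 from by simp,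
            sRight]
      | succ M'' =>
        have h1 : ((m - 1 - ((M'' + 1 : Nat) : Int)) == m - 1) = false := by
          simp; omega
        rw [h1, Bool.false_or]
        rw [List.range_succ, List.map_append, List.map_cons, List.map_nil,
            PySem.List.pyGetD_neg_one_append_singleton]
        have hj1 : m - 1 - ((M'' : Nat) : Int) = (m - 1 - ((M'' + 1 : Nat) : Int)) + 1 := by
          push_cast; ring
        rw [hj1]
        rw [show (m - 1 - (m - 1 - ((M'' + 1 : Nat) : Int))).toNat
              = (m - 1 - ((m - 1 - ((M'' + 1 : Nat) : Int)) + 1)).toNat + 1 from by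
            push_cast; omega]
        rw [sRight]

lemma botTablesB_eq (board : List String) (n m : Int) (hn : 0 ≤ n) :
    botTablesB board n m = (downT board n m, rightT board n m) := by
  unfold botTablesB
  rw [PySem.List.pyRange_neg_one]
  rw [show (n - 1 - (-1)).toNat = n.toNat from by omega]
  simp only [List.foldl_map]
  have h : ∀ N : Nat, N ≤ n.toNat →
      List.foldl
        (fun (t : List (List Int) × List (List Int)) (k : Nat) =>
          (t.1 ++ [(botRowB board n m (n - 1 - (k : Int)) t.1).1.reverse],
           t.2 ++ [(botRowB board n m (n - 1 - (k : Int)) t.1).2.reverse]))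
        ([], []) (List.range N) =
      ((List.range N).map (fun (k : Nat) =>
          ((List.range m.toNat).map (fun (k' : Nat) =>
            sDown board (n - 1 - (n - 1 - (k : Int))).toNat (n - 1 - (k : Int)) (m - 1 - (k' : Int)))).reverse),
       (List.range N).map (fun (k : Nat) =>
          ((List.range m.toNat).map (fun (k' : Nat) =>
            sRight board (m - 1 - (m - 1 - (k' : Int))).toNat (n - 1 - (k : Int)) (m - 1 - (k' : Int)))).reverse)) := by
    intro N hN
    induction N with
    | zero => simp
    | succ N' ih =>
      rw [List.range_succ, List.foldl_append, ih (by omega)]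
      simp only [List.foldl_cons, List.foldl_nil]
      rw [botRowB_eq board n m _ _ ?_ (by omega)]
      · simp only [List.map_append, List.map_cons, List.map_nil]
      · -- the 'down[-1]' lookup resolves to the previously built row (for i+1)
        intro hne b hb
        cases N' with
        | zero => simp at hne
        | succ N'' =>
          unfold tget
          rw [List.range_succ, List.map_append, List.map_cons, List.map_nil,
              PySem.List.pyGetD_neg_one_append_singleton]
          have hm0 : 0 < m := by omega
          rw [reverse_map_range m.toNat m (by omega)
                (fun j => sDown board (n - 1 - (n - 1 - ((N'' : Nat) : Int))).toNat (n - 1 - ((N'' : Nat) : Int)) j)]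
          rw [PySem.List.pyGetD_natCast]
          have h2 : (List.map (fun (k : Nat) =>
              sDown board (n - 1 - (n - 1 - ((N'' : Nat) : Int))).toNat (n - 1 - ((N'' : Nat) : Int)) ((k : Nat) : Int))
              (List.range m.toNat)).getD b 0
              = sDown board (n - 1 - (n - 1 - ((N'' : Nat) : Int))).toNat (n - 1 - ((N'' : Nat) : Int)) (b : Int) := by
            simp [hb]
          rw [h2]
          congr 1
          · omega
          · push_cast; ring
  rw [h n.toNat le_rfl]
  unfold downT rightT
  refine Prod.ext ?_ ?_
  · simp only []
    rw [reverse_map_range n.toNat n (by omega)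
          (fun iI => ((List.range m.toNat).map (fun (k' : Nat) =>
            sDown board (n - 1 - iI).toNat iI (m - 1 - (k' : Int)))).reverse)]
    apply List.map_congr_left
    intro a _
    by_cases hm : 0 ≤ m
    · rw [reverse_map_range m.toNat m (by omega)
            (fun j => sDown board (n - 1 - ((a : Nat) : Int)).toNat ((a : Nat) : Int) j)]
    · rw [show m.toNat = 0 from by omega]
      simp
  · simp only []
    rw [reverse_map_range n.toNat n (by omega)
          (fun iI => ((List.range m.toNat).map (fun (k' : Nat) =>
            sRight board (m - 1 - (m - 1 - (k' : Int))).toNat iI (m - 1 - (k' : Int)))).reverse)]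
    apply List.map_congr_left
    intro a _
    by_cases hm : 0 ≤ m
    · have := reverse_map_range m.toNat m (by omega)
            (fun j => sRight board (m - 1 - j).toNat ((a : Nat) : Int) j)
      simpa using this
    · rw [show m.toNat = 0 from by omega]
      simp

def InB (n m : Int) (p : Int × Int) : Prop :=
  0 ≤ p.1 ∧ p.1 < n ∧ 0 ≤ p.2 ∧ p.2 < m

lemma tget_map (f : Nat → Nat → Int) (N M a b : Nat) (ha : a < N) (hb : b < M) :
    tget ((List.range N).map (fun (a : Nat) => (List.range M).map (fun (b : Nat) => f a b)))
        (a : Int) (b : Int) = f a b := by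
  unfold tget
  simp [ha, hb]

lemma tget_upT (board : List String) (n m : Int) (a b : Nat)
    (ha : a < n.toNat) (hb : b < m.toNat) :
    tget (upT board n m) (a : Int) (b : Int) = sUp board a (b : Int) := by
  unfold upT; exact tget_map _ _ _ _ _ ha hb

lemma tget_leftT (board : List String) (n m : Int) (a b : Nat)
    (ha : a < n.toNat) (hb : b < m.toNat) :
    tget (leftT board n m) (a : Int) (b : Int) = sLeft board (a : Int) b := by
  unfold leftT; exact tget_map _ _ _ _ _ ha hb

lemma tget_downT (board : List String) (n m : Int) (a b : Nat)
    (ha : a < n.toNat) (hb : b < m.toNat) :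
    tget (downT board n m) (a : Int) (b : Int)
      = sDown board (n - 1 - (a : Int)).toNat (a : Int) (b : Int) := by
  unfold downT; exact tget_map _ _ _ _ _ ha hb

lemma tget_rightT (board : List String) (n m : Int) (a b : Nat)
    (ha : a < n.toNat) (hb : b < m.toNat) :
    tget (rightT board n m) (a : Int) (b : Int)
      = sRight board (m - 1 - (b : Int)).toNat (a : Int) (b : Int) := by
  unfold rightT; exact tget_map _ _ _ _ _ ha hb

lemma expand_eq (board : List String) (n m : Int) (a b : Nat)
    (ha : a < n.toNat) (hb : b < m.toNat)
    (qv : List (Int × Int) × List (List Bool)) :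
    expandA board n m (n + m).toNat (a : Int) (b : Int) qv
      = expandB (upT board n m) (downT board n m) (leftT board n m) (rightT board n m)
          (a : Int) (b : Int) qv := by
  have hm0 : 0 < m := by omega
  have hn0 : 0 < n := by omega
  unfold expandA expandB dirsA
  simp only [List.foldl_cons, List.foldl_nil]
  rw [slideA_up board n m (b : Int) (by omega) (by omega) a (n + m).toNat (by omega) (by omega),
      slideA_down board n m (b : Int) (by omega) (by omega) (n - 1 - (a : Int)).toNat (n + m).toNat
        (a : Int) (by omega) (by omega) (by omega),
      slideA_left board n m (a : Int) (by omega) (by omega) b (n + m).toNat (by omega) (by omega),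
      slideA_right board n m (a : Int) (by omega) (by omega) (m - 1 - (b : Int)).toNat (n + m).toNat
        (b : Int) (by omega) (by omega) (by omega),
      tget_upT board n m a b ha hb, tget_downT board n m a b ha hb,
      tget_leftT board n m a b ha hb, tget_rightT board n m a b ha hb]

lemma expandB_shift (U D L R : List (List Int)) (x y : Int)
    (l1 l2 : List (Int × Int)) (v : List (List Bool)) :
    expandB U D L R x y (l1 ++ l2, v)
      = (l1 ++ (expandB U D L R x y (l2, v)).1, (expandB U D L R x y (l2, v)).2) := by
  unfold expandB
  simp only [List.foldl_cons, List.foldl_nil]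
  split_ifs <;> simp [List.append_assoc]

lemma foldl_mark_mem (elems : List (Int × Int)) :
    ∀ (l : List (Int × Int)) (v : List (List Bool)) (p : Int × Int),
      p ∈ (elems.foldl
        (fun (nv : List (Int × Int) × List (List Bool)) e =>
          if vget nv.2 e.1 e.2 then nv else (nv.1 ++ [e], vset nv.2 e.1 e.2)) (l, v)).1 →
      p ∈ l ∨ p ∈ elems := by
  induction elems with
  | nil => intro l v p hp; exact Or.inl hp
  | cons e es ih =>
    intro l v p hp
    simp only [List.foldl_cons] at hp
    by_cases hv : vget v e.1 e.2
    · rw [if_pos hv] at hp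
      rcases ih l v p hp with h | h
      · exact Or.inl h
      · exact Or.inr (List.mem_cons_of_mem _ h)
    · rw [if_neg hv] at hp
      rcases ih (l ++ [e]) (vset v e.1 e.2) p hp with h | h
      · rcases List.mem_append.mp h with h | h
        · exact Or.inl h
        · simp at h; subst h; exact Or.inr (List.mem_cons_self)
      · exact Or.inr (List.mem_cons_of_mem _ h)

lemma expandB_inb (board : List String) (n m : Int) (a b : Nat)
    (ha : a < n.toNat) (hb : b < m.toNat)
    (l : List (Int × Int)) (v : List (List Bool)) (hl : ∀ p ∈ l, InB n m p) :
    ∀ p ∈ (expandB (upT board n m) (downT board n m) (leftT board n m) (rightT board n m)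
        (a : Int) (b : Int) (l, v)).1, InB n m p := by
  intro p hp
  unfold expandB at hp
  rcases foldl_mark_mem _ l v p hp with h | h
  · exact hl p h
  · rw [tget_upT board n m a b ha hb, tget_downT board n m a b ha hb,
        tget_leftT board n m a b ha hb, tget_rightT board n m a b ha hb] at h
    have h1 := sUp_bounds board a (b : Int)
    have h2 := sDown_bounds board (n - 1 - (a : Int)).toNat (a : Int) (b : Int)
    have h3 := sLeft_bounds board (a : Int) b
    have h4 := sRight_bounds board (m - 1 - (b : Int)).toNat (a : Int) (b : Int)
    simp only [List.mem_cons, List.mem_singleton, List.not_mem_nil, or_false] at h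
    unfold InB
    rcases h with h | h | h | h <;> subst h <;> simp only [] <;> omega

lemma level_eq (board : List String) (n m : Int) :
    ∀ (q nxt : List (Int × Int)) (v : List (List Bool)),
      (∀ p ∈ q, InB n m p) → (∀ p ∈ nxt, InB n m p) →
      (levelA board n m (n + m).toNat q.length (q ++ nxt) v).2.1
          = (levelB board (upT board n m) (downT board n m) (leftT board n m) (rightT board n m)
              q nxt v).2.1 ∧
      (levelA board n m (n + m).toNat q.length (q ++ nxt) v).2.2
          = (levelB board (upT board n m) (downT board n m) (leftT board n m) (rightT board n m)
              q nxt v).2.2 ∧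
      ((levelA board n m (n + m).toNat q.length (q ++ nxt) v).2.2 = false →
        (levelA board n m (n + m).toNat q.length (q ++ nxt) v).1
            = (levelB board (upT board n m) (downT board n m) (leftT board n m) (rightT board n m)
                q nxt v).1 ∧
        ∀ p ∈ (levelB board (upT board n m) (downT board n m) (leftT board n m) (rightT board n m)
            q nxt v).1, InB n m p) := by
  intro q
  induction q with
  | nil =>
    intro nxt v hq hnxt
    exact ⟨rfl, rfl, fun _ => ⟨rfl, hnxt⟩⟩
  | cons p rest ih =>
    intro nxt v hq hnxt
    obtain ⟨x, y⟩ := p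
    obtain ⟨hx0, hxn, hy0, hym⟩ := hq (x, y) List.mem_cons_self
    simp only at hx0 hxn hy0 hym
    have hrest : ∀ p ∈ rest, InB n m p := fun p hp => hq p (List.mem_cons_of_mem _ hp)
    simp only [List.length_cons, List.cons_append, levelA, levelB]
    by_cases hG : (bget board x y == 'G') = true
    · rw [if_pos hG, if_pos hG]
      exact ⟨rfl, rfl, fun h => absurd h (by simp)⟩
    · rw [if_neg hG, if_neg hG]
      have hax : ((x.toNat : Nat) : Int) = x := Int.toNat_of_nonneg hx0
      have hay : ((y.toNat : Nat) : Int) = y := Int.toNat_of_nonneg hy0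
      have han : x.toNat < n.toNat := by omega
      have ham : y.toNat < m.toNat := by omega
      rw [show expandA board n m (n + m).toNat x y (rest ++ nxt, v)
            = expandB (upT board n m) (downT board n m) (leftT board n m) (rightT board n m)
                x y (rest ++ nxt, v) from by
          rw [← hax, ← hay]; exact expand_eq board n m x.toNat y.toNat han ham _]
      rw [expandB_shift]
      have hnxt' : ∀ p ∈ (expandB (upT board n m) (downT board n m) (leftT board n m)
          (rightT board n m) x y (nxt, v)).1, InB n m p := by
        rw [← hax, ← hay]
        exact expandB_inb board n m x.toNat y.toNat han ham nxt v hnxt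
      exact ih _ _ hrest hnxt'

lemma bfs_eq (board : List String) (n m : Int) :
    ∀ (f : Nat) (q : List (Int × Int)) (v : List (List Bool)) (ans : Int),
      (∀ p ∈ q, InB n m p) →
      bfsA board n m (n + m).toNat f q v ans
        = bfsB board (upT board n m) (downT board n m) (leftT board n m) (rightT board n m)
            f q v ans := by
  intro f
  induction f with
  | zero => intro q v ans _; rfl
  | succ f ih =>
    intro q v ans hq
    simp only [bfsA, bfsB]
    by_cases he : q.isEmpty
    · rw [if_pos he, if_pos he]
    · rw [if_neg he, if_neg he]
      have h := level_eq board n m q [] v hq (by simp)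
      rw [List.append_nil] at h
      obtain ⟨h1, h2, h3⟩ := h
      by_cases hflag : (levelA board n m (n + m).toNat q.length q v).2.2 = true
      · rw [if_pos hflag, if_pos (h2 ▸ hflag)]
      · have hflag' : (levelA board n m (n + m).toNat q.length q v).2.2 = false := by
          simpa using hflag
        obtain ⟨h4, h5⟩ := h3 hflag'
        rw [if_neg hflag, if_neg (by rw [← h2]; simpa using hflag)]
        rw [h1, h4]
        exact ih _ _ _ h5

lemma findStart_inb (board : List String) (n m : Int) (hn : 0 < n) (hm : 0 < m) :
    InB n m (findStart board n m) := by
  unfold findStart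
  refine List.foldlRecOn _ _ (⟨le_refl 0, hn, le_refl 0, hm⟩ : InB n m ((0 : Int), (0 : Int))) ?_
  intro s hs i hi
  refine List.foldlRecOn _ _ hs ?_
  intro s' hs' j hj
  split
  · have hi' := PySem.List.mem_pyRange_one.mp hi
    have hj' := PySem.List.mem_pyRange_one.mp hj
    exact ⟨by omega, by omega, by omega, by omega⟩
  · exact hs'

-- ===== VERDICT (by name: the statement is the Claim_ definition above) =====
theorem solution_spec : Claim_equal_solution := by
  intro board hdom hpre
  unfold Spec_solution
  obtain ⟨hne, hm0, _⟩ := hpre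
  obtain ⟨hd, tl, rfl⟩ : ∃ hd tl, board = hd :: tl := by
    cases board with
    | nil => exact absurd rfl hne
    | cons hd tl => exact ⟨hd, tl, rfl⟩
  simp only [List.headD_cons] at hm0
  unfold solution solution_alt
  simp only [PySem.List.pyGet?_zero_cons, Option.getD_some]
  rw [topTablesB_eq, botTablesB_eq _ _ _ (by positivity)]
  have hn : (0 : Int) < ((hd :: tl).length : Int) := by simp
  have hm : (0 : Int) < (hd.toList.length : Int) := by exact_mod_cast hm0
  apply bfs_eq
  intro p hp
  simp only [List.mem_singleton] at hp
  subst hp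
  exact findStart_inb _ _ _ hn hm
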